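-- pv_equiv track=rewrite | github.com/shevchenkoAndriy/-DICT_python_education_Shevchenko_Andriy | regular_expressions/regular_expressions.py | regex_recursion
-- ===== SOURCE A (Python) =====
-- def regex_recursion(regex, string):
--     if regex == "":
--         return True
--     elif string == "":
--         return False
--     elif regex[0] != "." and regex[0] != string[0]:
--         return False
--     else:
--         return regex_recursion(regex[1:], string[1:])
-- ===== SOURCE B (Python) =====
-- def regex_recursion(regex, string):
--     if len(regex) > len(string):
--         return False
--     for i in range(len(regex)):
--         if regex[i] != "." and regex[i] != string[i]:
--             return False
--     return True
-- ===== Notes on version B (the rewrite author's own statement) =====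
-- stated objective: faster
-- what changed: Replaced the recursion that slices both strings on every step with a single index-based loop after an upfront length check.
import Mathlib
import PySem

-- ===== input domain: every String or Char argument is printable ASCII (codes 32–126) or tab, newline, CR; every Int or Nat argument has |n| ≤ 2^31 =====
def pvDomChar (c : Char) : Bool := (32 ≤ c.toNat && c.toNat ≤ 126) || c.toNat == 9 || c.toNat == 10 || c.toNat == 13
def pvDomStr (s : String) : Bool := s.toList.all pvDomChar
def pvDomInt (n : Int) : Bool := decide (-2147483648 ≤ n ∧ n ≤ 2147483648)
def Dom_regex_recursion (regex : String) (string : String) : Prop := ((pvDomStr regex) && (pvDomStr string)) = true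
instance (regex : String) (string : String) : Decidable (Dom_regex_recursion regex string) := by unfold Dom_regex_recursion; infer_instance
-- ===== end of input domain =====

-- B replaces A's recursive slicing with one length check and a single index loop (faster).


-- ===== PORT A =====
-- literal transliteration of A's recursion; the [1:] slices are the list tails
def regexRecGo : List Char → List Char → Bool
  | [], _ => true
  | _ :: _, [] => false
  | r :: rs, s :: ss => if r ≠ '.' ∧ r ≠ s then false else regexRecGo rs ss

def regex_recursion (regex : String) (string : String) : Bool :=
  regexRecGo regex.toList string.toList

-- ===== PORT B =====
-- length check, then a loop over the indices (early exit = List.all)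
def regex_recursion_alt (regex : String) (string : String) : Bool :=
  let r := regex.toList
  let s := string.toList
  if s.length < r.length then false
  else (List.range r.length).all (fun i => r.getD i ' ' == '.' || r.getD i ' ' == s.getD i ' ')

-- ===== PRECONDITION & SPEC =====
def Spec_regex_recursion (regex : String) (string : String) (out : Bool) : Prop := out = regex_recursion_alt regex string
instance (regex : String) (string : String) (out : Bool) : Decidable (Spec_regex_recursion regex string out) := by unfold Spec_regex_recursion; infer_instance

-- ===== CLAIM (what is proved, stated in full; the proofs are below) =====
def Claim_equal_regex_recursion : Prop := ∀ (regex : String) (string : String), Dom_regex_recursion regex string → Spec_regex_recursion regex string (regex_recursion regex string)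

-- ===== LEMMAS AND PROOFS =====
theorem regexRecGo_eq (r : List Char) : ∀ s : List Char,
    regexRecGo r s =
      (if s.length < r.length then false
       else (List.range r.length).all (fun i => r.getD i ' ' == '.' || r.getD i ' ' == s.getD i ' ')) := by
  induction r with
  | nil => intro s; simp [regexRecGo]
  | cons x rs ih =>
    intro s
    cases s with
    | nil => simp [regexRecGo]
    | cons y ys =>
      simp only [regexRecGo, List.length_cons, List.range_succ_eq_map, List.all_cons,
        List.all_map, Function.comp_def, List.getD_cons_succ, List.getD_cons_zero, ih ys,
        Nat.add_lt_add_iff_right]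
      by_cases h : x ≠ '.' ∧ x ≠ y
      · have h1 : (x == '.') = false := by simp [h.1]
        have h2 : (x == y) = false := by simp [h.2]
        simp [h, h1, h2]
      · rcases not_and_or.mp h with h' | h'
        · have hx : x = '.' := not_not.mp h'
          simp [hx]
        · have hx : x = y := not_not.mp h'
          simp [hx]

-- ===== VERDICT (by name: the statement is the Claim_ definition above) =====
theorem regex_recursion_spec : Claim_equal_regex_recursion := by
  intro regex string _
  unfold Spec_regex_recursion regex_recursion regex_recursion_alt
  exact regexRecGo_eq _ _
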